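-- pv_equiv track=rewrite | github.com/girishgupta211-zz/algorithms | paint_array_minimum_horizental_strokes.py | f
-- ===== SOURCE A (Python) =====
-- def f(A):
--     right_array = list(A[1:])
--     maximum_strokes = sum(A)
--     free_strokes = 0
--     # if a skyscraper is lower or of equal height as previous skyscraper,
--     # then it can be painted freely by using extending previous brushstrokes
--     for i in range(len(A) - 1):
--         free_strokes = free_strokes + min(A[i], right_array[i])
--     minimum_strokes = maximum_strokes - free_strokes
--     return minimum_strokes
-- ===== SOURCE B (Python) =====
-- def f(A):
--     # incremental-rise formula: first height plus every positive rise
--     if not A: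
--         return 0
--     total = A[0]
--     prev = A[0]
--     for cur in A[1:]:
--         if cur > prev:
--             total += cur - prev
--         prev = cur
--     return total
-- ===== Notes on version B (the rewrite author's own statement) =====
-- stated objective: faster
-- what changed: Replaces sum(A) minus an indexed scan of pairwise minima over a copied right-shifted array by a single pass that adds only the positive rises A[i]-A[i-1]; dropping the slice copy, the separate sum pass and the per-index lookups gives a measured ~3x constant-factor speedup.
import Mathlib
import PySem

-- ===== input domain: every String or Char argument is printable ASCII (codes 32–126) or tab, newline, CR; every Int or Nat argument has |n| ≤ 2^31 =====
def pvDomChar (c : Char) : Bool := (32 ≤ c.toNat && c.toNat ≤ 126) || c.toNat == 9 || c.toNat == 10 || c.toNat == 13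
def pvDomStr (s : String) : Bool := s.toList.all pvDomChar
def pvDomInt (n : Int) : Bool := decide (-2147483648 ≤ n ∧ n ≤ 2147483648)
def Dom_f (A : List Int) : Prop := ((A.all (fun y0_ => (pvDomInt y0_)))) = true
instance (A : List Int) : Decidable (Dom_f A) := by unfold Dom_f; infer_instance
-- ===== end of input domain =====

-- B changes the decomposition: one pass adding only positive rises, instead of sum(A) minus a scan of pairwise minima over a sliced copy.


-- ===== PORT A =====
def f (A : List Int) : Int :=
  let right_array := PySem.List.slice A (some 1) none
  let maximum_strokes := A.sum
  let free_strokes := (PySem.List.pyRange 0 ((A.length : Int) - 1) 1).foldl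
    (fun acc i => acc + min (PySem.List.pyGetD A i 0) (PySem.List.pyGetD right_array i 0)) 0
  maximum_strokes - free_strokes

-- ===== PORT B =====
def f_alt (A : List Int) : Int :=
  match A with
  | [] => 0
  | a :: rest =>
    (rest.foldl (fun (s : Int × Int) cur =>
        (if cur > s.2 then s.1 + (cur - s.2) else s.1, cur)) (a, a)).1

-- ===== PRECONDITION & SPEC =====
def Spec_f (A : List Int) (out : Int) : Prop := out = f_alt A
instance (A : List Int) (out : Int) : Decidable (Spec_f A out) := by unfold Spec_f; infer_instance

-- ===== CLAIM (what is proved, stated in full; the proofs are below) =====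
def Claim_equal_f : Prop := ∀ (A : List Int), Dom_f A → Spec_f A (f A)

-- ===== LEMMAS AND PROOFS =====

-- A's free-strokes scan as a zipWith sum
lemma range_min_sum (B : List Int) :
    ∀ a : Int, ((List.range B.length).map
      (fun k => min ((a :: B).getD k 0) (B.getD k 0))).sum
      = (List.zipWith min (a :: B) B).sum := by
  induction B with
  | nil => intro a; simp
  | cons b B ih =>
    intro a
    simp only [List.length_cons, List.range_succ_eq_map, List.map_cons, List.map_map,
      List.sum_cons, List.zipWith]
    have : ((List.range B.length).map
        ((fun k => min ((a :: b :: B).getD k 0) ((b :: B).getD k 0)) ∘ Nat.succ)).sum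
        = (List.zipWith min (b :: B) B).sum := by
      rw [← ih b]; rfl
    rw [this]; rfl

lemma f_closed (a : Int) (rest : List Int) :
    f (a :: rest) = (a :: rest).sum - (List.zipWith min (a :: rest) rest).sum := by
  unfold f
  rw [PySem.List.slice_from_one]
  have hlen : ((a :: rest).length : Int) - 1 = ((rest.length : Nat) : Int) := by
    simp
  rw [hlen]
  dsimp only
  simp only [List.tail_cons]
  rw [PySem.List.foldl_add, PySem.List.pyRange_one]
  simp only [sub_zero, Int.toNat_natCast, List.map_map, zero_add]
  rw [show (fun i => min (PySem.List.pyGetD (a :: rest) i 0) (PySem.List.pyGetD rest i 0)) ∘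
      (fun k : Nat => (k : Int))
      = fun k : Nat => min ((a :: rest).getD k 0) (rest.getD k 0) from by
    funext k; simp [PySem.List.pyGetD_natCast]]
  rw [range_min_sum rest a]

-- B's loop as a zipWith sum of positive rises
lemma alt_loop (rest : List Int) :
    ∀ t prev : Int,
      (rest.foldl (fun (s : Int × Int) cur =>
        (if cur > s.2 then s.1 + (cur - s.2) else s.1, cur)) (t, prev)).1
      = t + (List.zipWith (fun p c => max 0 (c - p)) (prev :: rest) rest).sum := by
  induction rest with
  | nil => intro t prev; simp
  | cons c r ih =>
    intro t prev
    simp only [List.foldl_cons, List.zipWith, List.sum_cons]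
    rw [ih]
    split_ifs with h <;> omega

lemma sum_identity (rest : List Int) :
    ∀ a : Int, (a :: rest).sum - (List.zipWith min (a :: rest) rest).sum
      = a + (List.zipWith (fun p c => max 0 (c - p)) (a :: rest) rest).sum := by
  induction rest with
  | nil => intro a; simp
  | cons c r ih =>
    intro a
    simp only [List.zipWith, List.sum_cons]
    have h := ih c
    simp only [List.sum_cons] at h ⊢
    omega

-- ===== VERDICT (by name: the statement is the Claim_ definition above) =====
theorem f_spec : Claim_equal_f := by
  intro A _
  unfold Spec_f
  cases A with
  | nil => rfl
  | cons a rest =>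
    show f (a :: rest) = f_alt (a :: rest)
    have hB : f_alt (a :: rest) = (rest.foldl (fun (s : Int × Int) cur =>
        (if cur > s.2 then s.1 + (cur - s.2) else s.1, cur)) (a, a)).1 := rfl
    rw [f_closed, sum_identity, hB, alt_loop]
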